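-- pv_equiv track=rewrite | github.com/rickpaul/becon-0.1 | util_Transformation.py | LIST_SPLITS
-- ===== SOURCE A (Python) =====
-- def LIST_SPLITS(splits, value):
-- 	try:
-- 		i = next(x[0] for x in enumerate(splits) if x[1] > value)
-- 	except StopIteration:
-- 		limit_above = None
-- 		limit_below = splits[len(splits)-1]
-- 	else:
-- 		if i == 0:
-- 			limit_above = splits[0]
-- 			limit_below = None
-- 		else:
-- 			limit_above = splits[i]
-- 			limit_below = splits[i-1]
-- 	return (limit_above, limit_below)
-- ===== SOURCE B (Python) =====
-- def LIST_SPLITS(splits, value):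
--     above = None
--     below = None
--     for s in reversed(splits):
--         if s > value:
--             above, below = s, None
--         elif below is None:
--             below = s
--     return (above, below)
-- ===== Notes on version B (the rewrite author's own statement) =====
-- stated objective: alternative
-- what changed: Replaces A's forward search (enumerate/next for the first index above value, then three list indexings) with a single backward scan over reversed(splits) that rebuilds the (above, below) pair right-to-left: each exceeding element overwrites the pair, and a non-exceeding element fills an empty 'below' slot; no index arithmetic, no early exit, no exception handling.
import Mathlib
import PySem

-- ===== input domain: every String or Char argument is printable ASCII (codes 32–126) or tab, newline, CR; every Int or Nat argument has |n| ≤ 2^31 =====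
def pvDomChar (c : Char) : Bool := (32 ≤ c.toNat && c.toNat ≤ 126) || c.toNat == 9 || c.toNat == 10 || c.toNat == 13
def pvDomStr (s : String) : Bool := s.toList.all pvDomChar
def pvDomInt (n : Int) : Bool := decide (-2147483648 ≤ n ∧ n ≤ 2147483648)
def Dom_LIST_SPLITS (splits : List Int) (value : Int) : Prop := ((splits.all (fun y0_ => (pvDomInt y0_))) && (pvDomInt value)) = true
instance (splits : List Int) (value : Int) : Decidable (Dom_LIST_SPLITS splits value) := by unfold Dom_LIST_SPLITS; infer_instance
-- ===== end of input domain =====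

-- B replaces A's forward enumerate/next index search + list indexings by one backward scan
-- over reversed(splits) that rebuilds the (above, below) pair right-to-left (objective:
-- alternative; same O(n) cost). No side effects in either version.

-- ===== PORT A =====
-- next(x[0] for x in enumerate(splits) if x[1] > value): first index of the enumerate list
-- whose element exceeds value; none = StopIteration.
def LIST_SPLITS_next (value : Int) : List (Int × Int) → Option Int
  | [] => none
  | x :: xs => if x.2 > value then some x.1 else LIST_SPLITS_next value xs

def LIST_SPLITS (splits : List Int) (value : Int) : List (Option Int) :=
  match LIST_SPLITS_next value (PySem.List.enumerate splits) with
  | none => [none, PySem.List.pyGet? splits ((splits.length : Int) - 1)]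
  | some i =>
    if i = 0 then [PySem.List.pyGet? splits 0, none]
    else [PySem.List.pyGet? splits i, PySem.List.pyGet? splits (i - 1)]

-- ===== PORT B =====
-- one iteration of Source B's loop body, state = (above, below)
def LIST_SPLITS_altStep (value : Int) (st : Option Int × Option Int) (s : Int) :
    Option Int × Option Int :=
  if s > value then (some s, none)
  else if st.2 = none then (st.1, some s) else st

def LIST_SPLITS_alt (splits : List Int) (value : Int) : List (Option Int) :=
  let st := splits.reverse.foldl (LIST_SPLITS_altStep value) (none, none)
  [st.1, st.2]

-- ===== PRECONDITION & SPEC =====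
-- A raises IndexError on splits = [] (splits[len(splits)-1]); Pre_ excludes exactly that input.
def Pre_LIST_SPLITS (splits : List Int) (value : Int) : Prop := splits ≠ []
instance (splits : List Int) (value : Int) : Decidable (Pre_LIST_SPLITS splits value) := by unfold Pre_LIST_SPLITS; infer_instance
def pvWitness_LIST_SPLITS : List Int × Int := ([1, 5, 9], 4)

def Spec_LIST_SPLITS (splits : List Int) (value : Int) (out : List (Option Int)) : Prop := out = LIST_SPLITS_alt splits value
instance (splits : List Int) (value : Int) (out : List (Option Int)) : Decidable (Spec_LIST_SPLITS splits value out) := by unfold Spec_LIST_SPLITS; infer_instance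

-- ===== CLAIM (what is proved, stated in full; the proofs are below) =====
def Claim_equal_LIST_SPLITS : Prop := ∀ (splits : List Int) (value : Int), Dom_LIST_SPLITS splits value → Pre_LIST_SPLITS splits value → Spec_LIST_SPLITS splits value (LIST_SPLITS splits value)

-- ===== LEMMAS AND PROOFS =====

-- A's generator = findIdx?, shifted by the enumerate start.
theorem LIST_SPLITS_next_enum (value : Int) (xs : List Int) (s : Int) :
    LIST_SPLITS_next value (PySem.List.enumerate xs s)
      = (List.findIdx? (fun x => decide (x > value)) xs).map (fun k => s + (k : Int)) := by
  induction xs generalizing s with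
  | nil => simp [LIST_SPLITS_next, PySem.List.enumerate_nil]
  | cons x xs ih =>
    rw [PySem.List.enumerate_cons]
    by_cases h : x > value
    · simp [LIST_SPLITS_next, h, List.findIdx?_cons]
    · simp only [LIST_SPLITS_next, h, List.findIdx?_cons, decide_eq_true_eq, if_false, ih]
      cases List.findIdx? (fun x => decide (x > value)) xs with
      | none => simp
      | some k => simp; ring

theorem LIST_SPLITS_next_enum0 (value : Int) (xs : List Int) :
    LIST_SPLITS_next value (PySem.List.enumerate xs)
      = (match List.findIdx? (fun x => decide (x > value)) xs with
         | none => none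
         | some k => some ((k : Int))) := by
  rw [LIST_SPLITS_next_enum value xs 0]
  cases List.findIdx? (fun x => decide (x > value)) xs <;> simp

theorem findIdx?_lt_len {p : Int → Bool} {xs : List Int} {j : Nat}
    (h : List.findIdx? p xs = some j) : j < xs.length := by
  induction xs generalizing j with
  | nil => simp at h
  | cons x xs ih =>
    rw [List.findIdx?_cons] at h
    by_cases hp : p x
    · simp [hp] at h; simp [List.length_cons]; omega
    · simp only [hp, if_false, Bool.false_eq_true] at h
      cases hfx : List.findIdx? p xs with
      | none => rw [hfx] at h; simp at h
      | some k =>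
        rw [hfx] at h; simp at h
        have := ih hfx
        simp [List.length_cons]; omega

-- B's backward fold, characterised via findIdx? on the original (un-reversed) list.
theorem LIST_SPLITS_alt_fold (value : Int) (xs : List Int) :
    xs.reverse.foldl (LIST_SPLITS_altStep value) (none, none)
      = match List.findIdx? (fun x => decide (x > value)) xs with
        | none => (none, xs.getLast?)
        | some j => (xs[j]?, if j = 0 then none else xs[j - 1]?) := by
  induction xs with
  | nil => simp
  | cons x xs ih =>
    rw [List.reverse_cons, List.foldl_append, ih]
    by_cases h : x > value
    · cases hf : List.findIdx? (fun x => decide (x > value)) xs with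
      | none => simp [List.findIdx?_cons, h, LIST_SPLITS_altStep]
      | some j =>
        have hj : j < xs.length := findIdx?_lt_len hf
        simp only [List.findIdx?_cons, h, decide_true, if_true]
        by_cases h0 : j = 0
        · subst h0
          simp only [List.foldl_cons, List.foldl_nil]
          simp [LIST_SPLITS_altStep, h]
        · simp only [List.foldl_cons, List.foldl_nil]
          simp [LIST_SPLITS_altStep, h, h0]
    · simp only [List.findIdx?_cons, h, decide_false, Bool.false_eq_true, if_false]
      cases hf : List.findIdx? (fun x => decide (x > value)) xs with
      | none =>
        simp only [List.foldl_cons, List.foldl_nil]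
        cases xs with
        | nil => simp [LIST_SPLITS_altStep, h]
        | cons y ys =>
          have hne : (y :: ys).getLast? ≠ none := by
            simp [List.getLast?_eq_getElem?]
          cases hl : (y :: ys).getLast? with
          | none => exact absurd hl hne
          | some l => simp [LIST_SPLITS_altStep, h, List.getLast?_cons_cons, hl]
      | some j =>
        have hj : j < xs.length := findIdx?_lt_len hf
        simp only [List.foldl_cons, List.foldl_nil, Option.map_some]
        have hj1 : j + 1 ≠ 0 := Nat.succ_ne_zero j
        by_cases h0 : j = 0
        · subst h0
          simp [LIST_SPLITS_altStep, h, hj1]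
        · have hs : xs[j - 1]? ≠ none := by
            have : j - 1 < xs.length := by omega
            simp [List.getElem?_eq_getElem this]
          cases hg : xs[j - 1]? with
          | none => exact absurd hg hs
          | some w =>
            obtain ⟨k, rfl⟩ : ∃ k, j = k + 1 := ⟨j - 1, by omega⟩
            have hg' : xs[k]? = some w := by simpa using hg
            simp [LIST_SPLITS_altStep, h, hg']

-- ===== VERDICT (by name: the statement is the Claim_ definition above) =====
theorem LIST_SPLITS_spec : Claim_equal_LIST_SPLITS := by
  intro splits value _ hpre
  unfold Spec_LIST_SPLITS LIST_SPLITS LIST_SPLITS_alt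
  rw [LIST_SPLITS_next_enum0, LIST_SPLITS_alt_fold]
  cases hf : List.findIdx? (fun x => decide (x > value)) splits with
  | none =>
    cases splits with
    | nil => exact absurd rfl hpre
    | cons a l =>
      have h1 : (((a :: l).length : Int) - 1) = ((l.length : Nat) : Int) := by
        simp [List.length_cons]
      rw [h1, PySem.List.pyGet?_natCast, List.getLast?_eq_getElem?]
      simp [List.length_cons]
  | some j =>
    have hj : j < splits.length := findIdx?_lt_len hf
    by_cases h0 : j = 0
    · subst h0
      simp [PySem.List.pyGet?_zero]
    · have h1 : ((j : Int) - 1) = ((j - 1 : Nat) : Int) := by omega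
      simp [h0, h1]
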